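-- pv_equiv track=rewrite | github.com/math-rs/adachemica | hybrid_learning.py | split_label_two_lines
-- ===== SOURCE A (Python) =====
-- def split_label_two_lines(s: str, max_len: int = 15) -> str:
--     """Split long labels across two lines near a space or punctuation."""
--     s = str(s).replace("\u00A0", " ")
--     if len(s) <= max_len:
--         return s
--     cand = [i for i, ch in enumerate(s) if ch in " -/" and 1 < i < len(s) - 1]
--     if cand:
--         split_idx = min(cand, key=lambda i: abs(i - max_len))
--         return s[:split_idx] + "\n" + s[split_idx + 1 :]
--     return s[:max_len] + "-\n" + s[max_len:]
-- ===== SOURCE B (Python) =====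
-- def split_label_two_lines(s: str, max_len: int = 15) -> str:
--     """Split long labels across two lines near a space or punctuation."""
--     s = str(s).replace("\u00A0", " ")
--     n = len(s)
--     if n <= max_len:
--         return s
--     # search outward from the (window-clamped) target index; left probe first
--     c = min(max(max_len, 2), n - 2)
--     for d in range(0, max(c - 2, n - 2 - c) + 1):
--         for i in (c - d, c + d):
--             if 2 <= i <= n - 2 and s[i] in " -/":
--                 return s[:i] + "\n" + s[i + 1:]
--     return s[:max_len] + "-\n" + s[max_len:]
-- ===== Notes on version B (the rewrite author's own statement) =====
-- stated objective: alternative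
-- what changed: Instead of materialising the full candidate-index list and taking min by distance, B searches outward from the (window-clamped) target index, probing left then right at each distance and returning at the first separator hit.
import Mathlib
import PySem

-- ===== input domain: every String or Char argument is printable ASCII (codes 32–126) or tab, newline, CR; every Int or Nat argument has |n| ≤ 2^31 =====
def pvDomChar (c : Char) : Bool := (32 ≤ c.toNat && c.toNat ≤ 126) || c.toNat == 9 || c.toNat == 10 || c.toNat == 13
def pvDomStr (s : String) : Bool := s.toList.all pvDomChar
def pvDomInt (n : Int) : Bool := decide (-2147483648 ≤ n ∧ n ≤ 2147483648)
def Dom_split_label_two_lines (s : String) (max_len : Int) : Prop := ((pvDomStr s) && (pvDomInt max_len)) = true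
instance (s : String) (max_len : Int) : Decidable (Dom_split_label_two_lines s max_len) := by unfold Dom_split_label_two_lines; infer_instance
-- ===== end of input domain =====

-- B replaces "build the candidate list, then min by distance" with an outward two-sided probe
-- from the clamped target index; equivalence is proved for the return value (alternative, not faster).

-- ===== PORT A =====
def split_label_two_lines (s0 : String) (max_len : Int) : String :=
  let s := PySem.Str.replace s0 "\u00A0" " "
  let cs := s.toList
  let n := PySem.List.len cs
  if n ≤ max_len then s
  else
    let cand := ((PySem.List.enumerate cs).filter
      (fun p => (" -/".toList).contains p.2 && decide (1 < p.1) && decide (p.1 < n - 1))).map Prod.fst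
    match PySem.List.min? cand (fun i => |i - max_len|) with
    | some split_idx =>
        String.ofList (PySem.List.slice cs none (some split_idx) ++
          '\n' :: PySem.List.slice cs (some (split_idx + 1)) none)
    | none =>
        String.ofList (PySem.List.slice cs none (some max_len) ++
          '-' :: '\n' :: PySem.List.slice cs (some max_len) none)

-- ===== PORT B =====
-- `2 <= i <= n - 2 and s[i] in " -/"` (guarded indexing: in range whenever tested true)
def altOk (cs : List Char) (n i : Int) : Bool :=
  decide (2 ≤ i) && decide (i ≤ n - 2) &&
    (match PySem.List.pyGet? cs i with
     | some ch => (" -/".toList).contains ch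
     | none => false)

def split_label_two_lines_alt (s0 : String) (max_len : Int) : String :=
  let s := PySem.Str.replace s0 "\u00A0" " "
  let cs := s.toList
  let n := PySem.List.len cs
  if n ≤ max_len then s
  else
    let c := min (max max_len 2) (n - 2)
    match (PySem.List.pyRange 0 (max (c - 2) (n - 2 - c) + 1)).findSome?
        (fun d => [c - d, c + d].find? (fun i => altOk cs n i)) with
    | some split_idx =>
        String.ofList (PySem.List.slice cs none (some split_idx) ++
          '\n' :: PySem.List.slice cs (some (split_idx + 1)) none)
    | none =>
        String.ofList (PySem.List.slice cs none (some max_len) ++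
          '-' :: '\n' :: PySem.List.slice cs (some max_len) none)

-- ===== PRECONDITION & SPEC =====
def Spec_split_label_two_lines (s : String) (max_len : Int) (out : String) : Prop := out = split_label_two_lines_alt s max_len
instance (s : String) (max_len : Int) (out : String) : Decidable (Spec_split_label_two_lines s max_len out) := by unfold Spec_split_label_two_lines; infer_instance

-- ===== CLAIM (what is proved, stated in full; the proofs are below) =====
def Claim_equal_split_label_two_lines : Prop := ∀ (s : String) (max_len : Int), Dom_split_label_two_lines s max_len → Spec_split_label_two_lines s max_len (split_label_two_lines s max_len)

-- ===== LEMMAS AND PROOFS =====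

-- min? is a left fold keeping the first minimum; on a strictly increasing list its result is
-- the lexicographic minimum by (key, value).
def pvStep (key : Int → Int) (acc : Option Int) (x : Int) : Option Int :=
  match acc with
  | none => some x
  | some m => if key x < key m then some x else some m

lemma min?_eq_foldl_pvStep (key : Int → Int) (xs : List Int) :
    PySem.List.min? xs key = xs.foldl (pvStep key) none := by
  rw [PySem.List.min?.eq_1]
  congr 1
  funext acc x
  cases acc <;> rfl

lemma minFold_spec (key : Int → Int) : ∀ (xs : List Int) (m : Int), List.Pairwise (· < ·) xs → (∀ y ∈ xs, m < y) →
    ∃ r, List.foldl (pvStep key) (some m) xs = some r ∧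
      (r = m ∨ r ∈ xs) ∧ (key r < key m ∨ (key r = key m ∧ r ≤ m)) ∧
      (∀ y ∈ xs, key r < key y ∨ (key r = key y ∧ r ≤ y)) := by
  intro xs
  induction xs with
  | nil => intro m _ _; exact ⟨m, rfl, Or.inl rfl, Or.inr ⟨rfl, le_refl m⟩, by simp⟩
  | cons x t ih =>
    intro m hp hlt
    have hxt : ∀ y ∈ t, x < y := fun y hy => (List.pairwise_cons.mp hp).1 y hy
    have hpt : List.Pairwise (· < ·) t := (List.pairwise_cons.mp hp).2
    have hmx : m < x := hlt x (by simp)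
    by_cases hk : key x < key m
    · obtain ⟨r, hfold, hmem, hlex, hall⟩ := ih x hpt hxt
      refine ⟨r, ?_, ?_, ?_, ?_⟩
      · simpa [List.foldl_cons, pvStep, if_pos hk] using hfold
      · rcases hmem with h1 | h1
        · exact Or.inr (by simp [h1])
        · exact Or.inr (by simp [h1])
      · rcases hlex with h1 | ⟨h1, _⟩
        · exact Or.inl (by omega)
        · exact Or.inl (by omega)
      · intro y hy
        rw [List.mem_cons] at hy
        rcases hy with rfl | hy
        · exact hlex
        · exact hall y hy
    · obtain ⟨r, hfold, hmem, hlex, hall⟩ := ih m hpt (fun y hy => hlt y (by simp [hy]))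
      refine ⟨r, ?_, ?_, hlex, ?_⟩
      · simpa [List.foldl_cons, pvStep, if_neg hk] using hfold
      · rcases hmem with h1 | h1
        · exact Or.inl h1
        · exact Or.inr (by simp [h1])
      · intro y hy
        rw [List.mem_cons] at hy
        rcases hy with rfl | hy
        · rcases hlex with h1 | ⟨h1, h2⟩
          · exact Or.inl (by omega)
          · rcases lt_or_eq_of_le (not_lt.mp hk) with h3 | h3
            · exact Or.inl (by omega)
            · exact Or.inr ⟨by omega, by omega⟩
        · exact hall y hy

lemma min?_spec (key : Int → Int) (xs : List Int) (hne : xs ≠ []) (hp : List.Pairwise (· < ·) xs) :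
    ∃ r, PySem.List.min? xs key = some r ∧ r ∈ xs ∧
      (∀ y ∈ xs, key r < key y ∨ (key r = key y ∧ r ≤ y)) := by
  match xs, hne with
  | x :: t, _ =>
    have hxt : ∀ y ∈ t, x < y := fun y hy => (List.pairwise_cons.mp hp).1 y hy
    have hpt : List.Pairwise (· < ·) t := (List.pairwise_cons.mp hp).2
    obtain ⟨r, hfold, hmem, hlex, hall⟩ := minFold_spec key t x hpt hxt
    refine ⟨r, ?_, ?_, ?_⟩
    · rw [min?_eq_foldl_pvStep, List.foldl_cons]
      exact hfold
    · rcases hmem with h1 | h1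
      · simp [h1]
      · simp [h1]
    · intro y hy
      rw [List.mem_cons] at hy
      rcases hy with rfl | hy
      · rcases hlex with h1 | ⟨h1, h2⟩
        · exact Or.inl h1
        · exact Or.inr ⟨h1, h2⟩
      · exact hall y hy

lemma pyRange_eq_nil {a b : Int} (h : ¬ a < b) : PySem.List.pyRange a b = [] := by
  simp [PySem.List.pyRange]
  omega

lemma findSome?_pyRange_none {β : Type} (f : Int → Option β) (a b : Int)
    (h : ∀ d, a ≤ d → d < b → f d = none) : (PySem.List.pyRange a b).findSome? f = none := by
  by_cases hab : a < b
  · rw [PySem.List.pyRange_one_cons hab, List.findSome?_cons, h a le_rfl hab]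
    exact findSome?_pyRange_none f (a + 1) b (fun d hd hd2 => h d (by omega) hd2)
  · rw [pyRange_eq_nil hab]; rfl
termination_by (b - a).toNat
decreasing_by omega

lemma findSome?_pyRange_some {β : Type} (f : Int → Option β) (a b d0 : Int) (m : β)
    (h1 : a ≤ d0) (h2 : d0 < b) (h3 : f d0 = some m)
    (h4 : ∀ d, a ≤ d → d < d0 → f d = none) : (PySem.List.pyRange a b).findSome? f = some m := by
  have hab : a < b := by omega
  rw [PySem.List.pyRange_one_cons hab, List.findSome?_cons]
  by_cases ha : a = d0
  · subst ha; rw [h3]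
  · rw [h4 a le_rfl (by omega)]
    exact findSome?_pyRange_some f (a + 1) b d0 m (by omega) h2 h3 (fun d hd hd2 => h4 d (by omega) hd2)
termination_by (b - a).toNat
decreasing_by omega

lemma altOk_bounds {cs : List Char} {n i : Int} (h : altOk cs n i = true) : 2 ≤ i ∧ i ≤ n - 2 := by
  simp only [altOk, Bool.and_eq_true, decide_eq_true_eq] at h
  exact h.1

-- membership in A's candidate list coincides with B's probe test
lemma mem_cand_iff (cs : List Char) (i : Int) :
    i ∈ ((PySem.List.enumerate cs).filter
      (fun p => (" -/".toList).contains p.2 && decide (1 < p.1) && decide (p.1 < PySem.List.len cs - 1))).map Prod.fst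
    ↔ altOk cs (PySem.List.len cs) i = true := by
  rw [List.mem_map]
  constructor
  · rintro ⟨p, hp, rfl⟩
    rw [List.mem_filter] at hp
    obtain ⟨hpe, hP⟩ := hp
    rw [PySem.List.mem_enumerate_iff] at hpe
    obtain ⟨k, hk, rfl⟩ := hpe
    simp only [Bool.and_eq_true, decide_eq_true_eq] at hP
    obtain ⟨⟨hc, h1⟩, h2⟩ := hP
    simp only [PySem.List.len] at h2 ⊢
    simp only [zero_add] at h1 h2 ⊢
    simp only [altOk, PySem.List.pyGet?_natCast, List.getElem?_eq_getElem hk]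
    simp only [Bool.and_eq_true, decide_eq_true_eq]
    exact ⟨⟨by omega, by omega⟩, hc⟩
  · intro h
    have hb := altOk_bounds h
    simp only [PySem.List.len] at hb
    have h0 : (0 : Int) ≤ i := by omega
    have hlt : i < (cs.length : Int) := by omega
    simp only [altOk, PySem.List.pyGet?_eq_some_getElem cs h0 hlt, Bool.and_eq_true,
      decide_eq_true_eq] at h
    obtain ⟨⟨h2, h3⟩, hc⟩ := h
    refine ⟨(i, cs[i.toNat]), ?_, rfl⟩
    rw [List.mem_filter, PySem.List.mem_enumerate_iff]
    constructor
    · exact ⟨i.toNat, by omega, by simp; omega⟩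
    · simp only [Bool.and_eq_true, decide_eq_true_eq, PySem.List.len]
      exact ⟨⟨hc, by omega⟩, by omega⟩

-- A's lexicographic order by (|i - max_len|, i) implies B's probe order
-- 2|i - c| + (side bit), for indices inside the valid window.
lemma lex_imp_bkey {max_len n c i j : Int} (hc : c = min (max max_len 2) (n - 2)) (hn : max_len < n)
    (hi1 : 2 ≤ i) (hi2 : i ≤ n - 2) (hj1 : 2 ≤ j) (hj2 : j ≤ n - 2)
    (hlex : |i - max_len| < |j - max_len| ∨ (|i - max_len| = |j - max_len| ∧ i ≤ j)) :
    2 * |i - c| + (if c < i then 1 else 0) ≤ 2 * |j - c| + (if c < j then 1 else 0) := by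
  rcases abs_cases (i - max_len) with ⟨e1, f1⟩ | ⟨e1, f1⟩ <;>
  rcases abs_cases (j - max_len) with ⟨e2, f2⟩ | ⟨e2, f2⟩ <;>
  rcases abs_cases (i - c) with ⟨e3, f3⟩ | ⟨e3, f3⟩ <;>
  rcases abs_cases (j - c) with ⟨e4, f4⟩ | ⟨e4, f4⟩ <;>
  rw [e1, e2] at hlex <;> rw [e3, e4] <;> split_ifs <;> omega

-- the core equality: A's "min over the candidate list" equals B's outward search
lemma core_eq (cs : List Char) (max_len : Int) (h : ¬ PySem.List.len cs ≤ max_len) :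
    PySem.List.min? (((PySem.List.enumerate cs).filter
        (fun p => (" -/".toList).contains p.2 && decide (1 < p.1) && decide (p.1 < PySem.List.len cs - 1))).map Prod.fst)
      (fun i => |i - max_len|)
    = (PySem.List.pyRange 0 (max (min (max max_len 2) (PySem.List.len cs - 2) - 2)
          (PySem.List.len cs - 2 - min (max max_len 2) (PySem.List.len cs - 2)) + 1)).findSome?
        (fun d => [min (max max_len 2) (PySem.List.len cs - 2) - d,
                   min (max max_len 2) (PySem.List.len cs - 2) + d].find? (fun i => altOk cs (PySem.List.len cs) i)) := by
  set n := PySem.List.len cs with hn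
  set c := min (max max_len 2) (n - 2) with hc
  set cand := ((PySem.List.enumerate cs).filter
      (fun p => (" -/".toList).contains p.2 && decide (1 < p.1) && decide (p.1 < n - 1))).map Prod.fst with hcand
  have hmem : ∀ i, i ∈ cand ↔ altOk cs n i = true := fun i => mem_cand_iff cs i
  have hml : max_len < n := by omega
  by_cases hne : cand = []
  · rw [hne]
    rw [(PySem.List.min?_eq_none_iff ([] : List Int) _).mpr rfl]
    symm
    apply findSome?_pyRange_none
    intro d _ _
    have hok : ∀ y, altOk cs n y = false := by
      intro y
      by_contra hy
      have hymem : y ∈ cand := (hmem y).mpr (by simpa using hy)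
      simp [hne] at hymem
    simp [List.find?, hok]
  · have hpair : List.Pairwise (· < ·) cand := by
      rw [hcand]
      apply (List.pairwise_map).mpr
      exact List.Pairwise.filter _ (PySem.List.pairwise_lt_enumerate cs 0)
    obtain ⟨r, hmin, hrmem, hall⟩ := min?_spec (fun i => |i - max_len|) cand hne hpair
    have hrok := (hmem r).mp hrmem
    obtain ⟨hr1, hr2⟩ := altOk_bounds hrok
    have hc1 : 2 ≤ c := by omega
    have hc2 : c ≤ n - 2 := by omega
    rw [hmin]
    symm
    have hearly : ∀ y, altOk cs n y = true →
        2 * |r - c| + (if c < r then 1 else 0) ≤ 2 * |y - c| + (if c < y then 1 else 0) := by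
      intro y hy
      obtain ⟨hy1, hy2⟩ := altOk_bounds hy
      exact lex_imp_bkey hc hml hr1 hr2 hy1 hy2 (hall y ((hmem y).mpr hy))
    apply findSome?_pyRange_some _ 0 _ |r - c| r
    · exact abs_nonneg _
    · rcases abs_cases (r - c) with ⟨e, f⟩ | ⟨e, f⟩ <;> omega
    · rcases le_or_gt r c with hrc | hrc
      · have hrw : c - |r - c| = r := by rcases abs_cases (r - c) with ⟨e, f⟩ | ⟨e, f⟩ <;> omega
        rw [hrw]
        simp [List.find?, hrok]
      · have hleft : altOk cs n (c - |r - c|) = false := by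
          by_contra hb
          have hb2 : altOk cs n (c - |r - c|) = true := by simpa using hb
          have hk2 := hearly _ hb2
          have e1 : |c - |r - c| - c| = |r - c| := by
            rw [abs_of_nonpos (by have := abs_nonneg (r - c); omega)]
            omega
          rw [e1] at hk2
          revert hk2
          rcases abs_cases (r - c) with ⟨e, f⟩ | ⟨e, f⟩ <;> split_ifs <;> omega
        have hright : c + |r - c| = r := by
          rcases abs_cases (r - c) with ⟨e, f⟩ | ⟨e, f⟩ <;> omega
        simp only [List.find?, hleft]
        rw [hright]
        simp [hrok]
    · intro d hd0 hdlt
      have hnone : ∀ y, y = c - d ∨ y = c + d → altOk cs n y = false := by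
        intro y hy
        by_contra hb
        have hb2 : altOk cs n y = true := by simpa using hb
        have hkey := hearly y hb2
        have e1 : |y - c| = d := by
          rcases hy with rfl | rfl
          · rw [abs_of_nonpos (by omega)]; omega
          · rw [abs_of_nonneg (by omega)]; omega
        rw [e1] at hkey
        revert hkey
        rcases abs_cases (r - c) with ⟨e, f⟩ | ⟨e, f⟩ <;> split_ifs <;> omega
      simp [List.find?, hnone _ (Or.inl rfl), hnone _ (Or.inr rfl)]

-- ===== VERDICT (by name: the statement is the Claim_ definition above) =====
theorem split_label_two_lines_spec : Claim_equal_split_label_two_lines := by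
  intro s max_len _
  unfold Spec_split_label_two_lines
  simp only [split_label_two_lines, split_label_two_lines_alt]
  split_ifs with h2
  · rfl
  · rw [core_eq _ max_len h2]
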